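-- pv_equiv track=rewrite | github.com/Brondinar/bulls-and-cows | bulls_and_cows/utils.py | cows_filter
-- ===== SOURCE A (Python) =====
-- from itertools import combinations
--
-- def cows_filter(cows_and_bulls, number, variants):
--     possible_variants = []
--     pos_comb = list(combinations(number, cows_and_bulls))
--     for comb in pos_comb:
--         for num in variants:
--             if set(comb).issubset(set(num)) and set(set(number) ^ set(comb)).isdisjoint(num):
--                 possible_variants.append(num)
--
--     return possible_variants
-- ===== SOURCE B (Python) =====
-- from itertools import combinations
--
-- def cows_filter(cows_and_bulls, number, variants):
--     # distinct chars of number, in first-occurrence order (canonical key base)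
--     base = list(dict.fromkeys(number))
--     # group variants once by the canonical form of set(num) & set(number)
--     groups = {}
--     for num in variants:
--         s = set(num)
--         key = tuple(c for c in base if c in s)
--         groups[key] = groups.get(key, []) + [num]
--     out = []
--     for comb in combinations(number, cows_and_bulls):
--         s = set(comb)
--         key = tuple(c for c in base if c in s)
--         out.extend(groups.get(key, []))
--     return out
-- ===== Notes on version B (the rewrite author's own statement) =====
-- stated objective: faster
-- what changed: B builds a dictionary once, grouping variants by the canonical form of set(num)&set(number), so each combination does a single O(1) lookup instead of rescanning and set-testing every variant; Pre_ only excludes negative cows_and_bulls, where combinations() raises ValueError in both A and B.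
import Mathlib
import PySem

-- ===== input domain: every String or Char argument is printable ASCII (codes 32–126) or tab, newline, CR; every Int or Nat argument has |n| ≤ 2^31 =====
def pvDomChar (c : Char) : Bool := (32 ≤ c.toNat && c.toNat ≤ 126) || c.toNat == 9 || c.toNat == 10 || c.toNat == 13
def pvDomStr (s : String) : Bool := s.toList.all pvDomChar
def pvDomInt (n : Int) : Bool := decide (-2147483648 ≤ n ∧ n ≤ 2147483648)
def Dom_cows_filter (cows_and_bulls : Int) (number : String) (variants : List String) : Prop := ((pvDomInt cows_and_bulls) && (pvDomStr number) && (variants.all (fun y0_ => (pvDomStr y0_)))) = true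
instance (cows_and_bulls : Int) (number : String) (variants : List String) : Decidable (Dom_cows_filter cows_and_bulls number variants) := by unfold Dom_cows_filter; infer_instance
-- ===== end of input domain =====

-- B groups variants once by the canonical form of set(num) ∩ set(number), so each combination
-- is a single dictionary lookup instead of a scan over all variants (asymptotically fewer passes).

-- ===== PORT A =====
-- itertools.combinations(seq, r), lexicographic by position (shared by both ports; both Pythons call it)
def pyCombinations : List Char → Nat → List (List Char)
  | _, 0 => [[]]
  | [], _ + 1 => []
  | x :: xs, r + 1 => (pyCombinations xs r).map (x :: ·) ++ pyCombinations xs (r + 1)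

-- set(comb).issubset(set(num)) and set(set(number) ^ set(comb)).isdisjoint(num)
def condA (number : String) (comb : List Char) (num : String) : Bool :=
  PySem.Set.issubset (PySem.Set.ofList comb) (PySem.Set.ofList num.toList) &&
  PySem.Set.isdisjoint
    (PySem.Set.ofList (PySem.Set.symmDiff (PySem.Set.ofList number.toList) (PySem.Set.ofList comb)))
    num.toList

def cows_filter (cows_and_bulls : Int) (number : String) (variants : List String) : List String :=
  (pyCombinations number.toList cows_and_bulls.toNat).foldl
    (fun acc comb =>
      variants.foldl (fun acc num => if condA number comb num then acc ++ [num] else acc) acc)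
    []

-- ===== PORT B =====
-- key = tuple(c for c in base if c in s)
def canonKey (base : List Char) (s : PySem.Set Char) : List Char :=
  base.filter (fun c => PySem.Set.contains s c)

def cows_filter_alt (cows_and_bulls : Int) (number : String) (variants : List String) : List String :=
  let base : List Char := PySem.List.dedup number.toList
  let groups : PySem.Dict (List Char) (List String) :=
    variants.foldl
      (fun d num => d.modify (canonKey base (PySem.Set.ofList num.toList)) [] (· ++ [num]))
      PySem.Dict.empty
  (pyCombinations number.toList cows_and_bulls.toNat).foldl
    (fun out comb => out ++ groups.getD (canonKey base (PySem.Set.ofList comb)) [])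
    []

-- ===== PRECONDITION & SPEC =====
-- Pre_ excludes cows_and_bulls < 0, where itertools.combinations raises ValueError (in A and in B alike)
def Pre_cows_filter (cows_and_bulls : Int) (number : String) (variants : List String) : Prop :=
  0 ≤ cows_and_bulls
instance (cows_and_bulls : Int) (number : String) (variants : List String) : Decidable (Pre_cows_filter cows_and_bulls number variants) := by unfold Pre_cows_filter; infer_instance
def pvWitness_cows_filter : Int × String × List String := (2, "123", ["124", "312", "45"])

def Spec_cows_filter (cows_and_bulls : Int) (number : String) (variants : List String) (out : List String) : Prop := out = cows_filter_alt cows_and_bulls number variants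
instance (cows_and_bulls : Int) (number : String) (variants : List String) (out : List String) : Decidable (Spec_cows_filter cows_and_bulls number variants out) := by unfold Spec_cows_filter; infer_instance

-- ===== CLAIM (what is proved, stated in full; the proofs are below) =====
def Claim_equal_cows_filter : Prop := ∀ (cows_and_bulls : Int) (number : String) (variants : List String), Dom_cows_filter cows_and_bulls number variants → Pre_cows_filter cows_and_bulls number variants → Spec_cows_filter cows_and_bulls number variants (cows_filter cows_and_bulls number variants)

-- ===== LEMMAS AND PROOFS =====

-- every element of a combination comes from the source list
theorem mem_of_mem_pyCombinations {l comb : List Char} {r : Nat}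
    (h : comb ∈ pyCombinations l r) : ∀ c ∈ comb, c ∈ l := by
  induction l generalizing comb r with
  | nil =>
    cases r with
    | zero => simp [pyCombinations] at h; simp [h]
    | succ r => simp [pyCombinations] at h
  | cons x xs ih =>
    cases r with
    | zero => simp [pyCombinations] at h; simp [h]
    | succ r =>
      simp only [pyCombinations, List.mem_append, List.mem_map] at h
      rcases h with ⟨t, ht, rfl⟩ | h
      · intro c hc
        rcases List.mem_cons.mp hc with rfl | hc
        · exact List.mem_cons_self
        · exact List.mem_cons_of_mem _ (ih ht c hc)
      · intro c hc
        exact List.mem_cons_of_mem _ (ih h c hc)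

-- two filters of the same list agree iff the predicates agree on its members
theorem filter_eq_filter_iff {α : Type} [DecidableEq α] (l : List α) (p q : α → Bool) :
    l.filter p = l.filter q ↔ ∀ c ∈ l, p c = q c := by
  constructor
  · intro h c hc
    cases hp : p c <;> cases hq : q c
    · rfl
    · have hm : c ∈ l.filter q := List.mem_filter.mpr ⟨hc, hq⟩
      rw [← h] at hm
      have := (List.mem_filter.mp hm).2
      rw [hp] at this; exact this
    · have hm : c ∈ l.filter p := List.mem_filter.mpr ⟨hc, hp⟩
      rw [h] at hm
      have := (List.mem_filter.mp hm).2
      rw [hq] at this; exact this.symm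
    · rfl
  · intro h
    exact List.filter_congr h

-- A's per-variant test is key equality, for combinations drawn from number
theorem condA_eq_key (number : String) (comb : List Char) (num : String)
    (hsub : ∀ c ∈ comb, c ∈ number.toList) :
    condA number comb num =
      (canonKey (PySem.List.dedup number.toList) (PySem.Set.ofList num.toList) ==
       canonKey (PySem.List.dedup number.toList) (PySem.Set.ofList comb)) := by
  rw [Bool.eq_iff_iff]
  simp only [condA, canonKey, Bool.and_eq_true, beq_iff_eq,
    PySem.List.dedup_eq_ofList]
  rw [filter_eq_filter_iff]
  constructor
  · rintro ⟨h1, h2⟩ c hc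
    have hcnum : c ∈ number.toList := by
      simpa [PySem.Set.mem_ofList] using hc
    simp only [PySem.Set.contains_eq_listContains, List.contains_eq_mem,
      PySem.Set.mem_ofList, decide_eq_decide]
    simp only [PySem.Set.issubset_iff, PySem.Set.mem_ofList] at h1
    simp only [PySem.Set.isdisjoint_iff, PySem.Set.mem_ofList, PySem.Set.mem_symmDiff,
      PySem.Set.mem_ofList] at h2
    constructor
    · intro hnum
      by_contra hcomb
      exact h2 c (Or.inl ⟨hcnum, hcomb⟩) hnum
    · intro hcomb
      exact h1 c hcomb
  · intro h
    have key : ∀ c ∈ number.toList, (c ∈ num.toList ↔ c ∈ comb) := by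
      intro c hc
      have := h c (by simpa [PySem.Set.mem_ofList] using hc)
      simpa [PySem.Set.contains_eq_listContains, List.contains_eq_mem,
        PySem.Set.mem_ofList, decide_eq_decide] using this
    constructor
    · simp only [PySem.Set.issubset_iff, PySem.Set.mem_ofList]
      intro c hc
      exact (key c (hsub c hc)).mpr hc
    · simp only [PySem.Set.isdisjoint_iff, PySem.Set.mem_ofList, PySem.Set.mem_symmDiff,
        PySem.Set.mem_ofList]
      rintro c (⟨hcn, hncomb⟩ | ⟨hccomb, hncn⟩) hcnum
      · exact hncomb ((key c hcn).mp hcnum)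
      · exact hncn (hsub c hccomb)

-- what B's group dictionary holds at each key
theorem groups_getD (variants : List String) (base : List Char) (k : List Char) :
    ((variants.foldl
        (fun d num => d.modify (canonKey base (PySem.Set.ofList num.toList)) [] (· ++ [num]))
        PySem.Dict.empty).getD k []) =
      variants.filter
        (fun num => canonKey base (PySem.Set.ofList num.toList) == k) := by
  have hmap :
      variants.foldl
        (fun d num => d.modify (canonKey base (PySem.Set.ofList num.toList)) [] (· ++ [num]))
        PySem.Dict.empty
      = (variants.map (fun num => (canonKey base (PySem.Set.ofList num.toList), num))).foldl
          (fun d p => d.modify p.1 [] (· ++ [p.2])) PySem.Dict.empty := by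
    rw [List.foldl_map]
  rw [hmap, PySem.Dict.getD_foldl_modify_append]
  simp [PySem.Dict.getD_empty, List.filter_map, Function.comp_def]

theorem cows_filter_spec : Claim_equal_cows_filter := by
  intro cows_and_bulls number variants _ _
  unfold Spec_cows_filter cows_filter cows_filter_alt
  apply PySem.List.foldl_congr_mem
  intro acc comb hcomb
  rw [PySem.List.foldl_append_if_eq_filter, groups_getD]
  congr 1
  apply List.filter_congr
  intro num _
  simpa using
    condA_eq_key number comb num (mem_of_mem_pyCombinations hcomb)
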